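-- pv_equiv track=rewrite | github.com/aayush97/semeval2023-afrisenti | ig_lexicon_based_submit.py | combine_pos_neg_lexica
-- ===== SOURCE A (Python) =====
-- def combine_pos_neg_lexica(dict1, dict2):
--   set1 = set(dict1.keys())
--   set2 = set(dict2.keys())
--   set3 = set1.intersection(set2)
--   if len(set3)==0:
--     dict1.update(dict2)
--   else:
--     for k in list(set3):
--       dict1.pop(k)
--       dict2.pop(k)
--       dict1.update(dict2)
--   return dict1
-- ===== SOURCE B (Python) =====
-- def combine_pos_neg_lexica(dict1, dict2):
--     # One pass over a snapshot of dict2's keys: a shared key is deleted from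
--     # both dicts, a fresh key is moved into dict1. No intersection set, no update().
--     # Like A, mutates both input dicts in place and returns dict1 itself.
--     for k in list(dict2):
--         if k in dict1:
--             del dict1[k]
--             del dict2[k]
--         else:
--             dict1[k] = dict2[k]
--     return dict1
-- ===== Notes on version B (the rewrite author's own statement) =====
-- stated objective: faster
-- what changed: B replaces A's intersection-set construction plus a dict.update(dict2) call re-executed inside the loop by a single pass over a snapshot of dict2's keys that deletes each shared key from both dicts and moves each fresh key into dict1.
import Mathlib
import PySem

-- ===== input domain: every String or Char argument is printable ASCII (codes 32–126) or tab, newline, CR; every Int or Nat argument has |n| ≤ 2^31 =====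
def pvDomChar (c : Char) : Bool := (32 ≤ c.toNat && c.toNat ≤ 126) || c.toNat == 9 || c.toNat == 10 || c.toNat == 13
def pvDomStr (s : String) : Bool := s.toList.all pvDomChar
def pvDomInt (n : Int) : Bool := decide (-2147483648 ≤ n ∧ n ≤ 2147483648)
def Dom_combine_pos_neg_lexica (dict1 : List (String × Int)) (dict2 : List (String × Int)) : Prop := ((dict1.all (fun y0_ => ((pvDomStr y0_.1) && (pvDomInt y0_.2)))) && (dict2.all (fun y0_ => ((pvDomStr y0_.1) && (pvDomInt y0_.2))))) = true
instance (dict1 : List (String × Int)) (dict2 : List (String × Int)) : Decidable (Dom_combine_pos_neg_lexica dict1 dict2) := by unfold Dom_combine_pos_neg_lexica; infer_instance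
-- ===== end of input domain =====

-- B replaces A's intersection-set + per-shared-key re-run of dict.update(dict2) with one
-- O(n1+n2) pass over dict2's keys (objective: faster, measured).
-- Both Pythons mutate dict1 and dict2 in place identically; the equivalence proved here
-- is about the returned mapping (dict1's final items).

-- ===== PORT A =====
-- dict1.pop(k) / dict2.pop(k): the popped value is discarded and k is always a key of
-- both dicts when popped (k comes from the key intersection and each key is popped
-- once), so the Python pop never raises and is ported as Dict.erase.
def combine_pos_neg_lexica (dict1 : List (String × Int)) (dict2 : List (String × Int)) : List (String × Int) :=
  let d1 := PySem.Dict.ofList dict1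
  let d2 := PySem.Dict.ofList dict2
  let set1 : PySem.Set String := PySem.Set.ofList d1.keys
  let set2 : PySem.Set String := PySem.Set.ofList d2.keys
  let set3 : PySem.Set String := PySem.Set.inter set1 set2
  if PySem.Set.len set3 == 0 then
    (d1.update d2.items).items
  else
    -- for k in list(set3): dict1.pop(k); dict2.pop(k); dict1.update(dict2)
    (set3.foldl
      (fun (st : PySem.Dict String Int × PySem.Dict String Int) k =>
        ((st.1.erase k).update (st.2.erase k).items, st.2.erase k))
      (d1, d2)).1.items

-- ===== PORT B =====
-- for k in list(dict2): if k in dict1: del dict1[k]; del dict2[k] else: dict1[k] = dict2[k]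
-- (dict2[k] is read as getD with an unused default: k is still a key of dict2 when reached)
def combine_pos_neg_lexica_alt (dict1 : List (String × Int)) (dict2 : List (String × Int)) : List (String × Int) :=
  let d2 := PySem.Dict.ofList dict2
  (d2.keys.foldl
    (fun (st : PySem.Dict String Int × PySem.Dict String Int) k =>
      if st.1.contains k then (st.1.erase k, st.2.erase k)
      else (st.1.insert k (st.2.getD k 0), st.2))
    (PySem.Dict.ofList dict1, d2)).1.items

-- ===== PRECONDITION & SPEC =====
def Spec_combine_pos_neg_lexica (dict1 : List (String × Int)) (dict2 : List (String × Int)) (out : List (String × Int)) : Prop := out = combine_pos_neg_lexica_alt dict1 dict2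
instance (dict1 : List (String × Int)) (dict2 : List (String × Int)) (out : List (String × Int)) : Decidable (Spec_combine_pos_neg_lexica dict1 dict2 out) := by unfold Spec_combine_pos_neg_lexica; infer_instance

-- ===== CLAIM (what is proved, stated in full; the proofs are below) =====
def Claim_equal_combine_pos_neg_lexica : Prop := ∀ (dict1 : List (String × Int)) (dict2 : List (String × Int)), Dom_combine_pos_neg_lexica dict1 dict2 → Spec_combine_pos_neg_lexica dict1 dict2 (combine_pos_neg_lexica dict1 dict2)

-- ===== LEMMAS AND PROOFS =====

-- The effect of A's update on one entry already present: overwrite with d2's value when d2 has its key.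
def pvOv (d2 : PySem.Dict String Int) (q : String × Int) : String × Int :=
  if d2.contains q.1 then (q.1, d2.getD q.1 0) else q

-- The effect of `d.update ps` on an entry already present in d.
def pvOw (ps : List (String × Int)) (q : String × Int) : String × Int :=
  match ps.find? (fun p => p.1 == q.1) with
  | some p => (q.1, p.2)
  | none => q

-- the common value both ports compute: dict1's entries off dict2, then dict2's entries off dict1
def pvMerge (d1 d2 : PySem.Dict String Int) : List (String × Int) :=
  d1.items.filter (fun p => !(d2.contains p.1)) ++ d2.items.filter (fun p => !(d1.contains p.1))

-- A's loop state after the shared keys in l have been processed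
def pvAi (d1 d2 : PySem.Dict String Int) (l : List String) : List (String × Int) :=
  (d1.items.filter (fun p => !(decide (p.1 ∈ l)))).map (pvOv d2)
    ++ d2.items.filter (fun p => !(d1.contains p.1))

def pvBi (d2 : PySem.Dict String Int) (l : List String) : List (String × Int) :=
  d2.items.filter (fun p => !(decide (p.1 ∈ l)))



lemma pv_find?_filter_key (xs : List (String × Int)) (x : String) (g : String → Bool)
    (hx : g x = true) :
    (xs.filter (fun p => g p.1)).find? (fun p => p.1 == x) = xs.find? (fun p => p.1 == x) := by
  induction xs with
  | nil => rfl
  | cons p ps ih =>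
    by_cases hp : p.1 = x
    · simp [List.filter_cons, hp, hx]
    · by_cases hg : g p.1 <;> simp [List.filter_cons, hg, beq_iff_eq, hp, ih]

lemma pv_contains_erase (d : PySem.Dict String Int) (k x : String) :
    (d.erase k).contains x = (d.contains x && !(x == k)) := by
  simp only [PySem.Dict.erase, PySem.Dict.contains, List.any_filter]
  by_cases hxk : x = k
  · subst hxk; simp
  · have hf : (x == k) = false := by simp [hxk]
    have hcong : ∀ p ∈ d.items, (!(p.1 == k) && p.1 == x) = (p.1 == x) := by
      intro p _
      by_cases h : p.1 = x
      · subst h; simp [beq_iff_eq, hxk]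
      · simp [beq_iff_eq, h]
    rw [PySem.List.any_congr_mem hcong, hf]
    simp

lemma pv_getD_erase_of_ne (d : PySem.Dict String Int) (k x : String) (v : Int) (h : x ≠ k) :
    (d.erase k).getD x v = d.getD x v := by
  simp only [PySem.Dict.getD, PySem.Dict.get?, PySem.Dict.erase]
  rw [pv_find?_filter_key d.items x (fun y => !(y == k)) (by simp [h])]



lemma pv_find?_key_eq_none (xs : List (String × Int)) (x : String)
    (h : ∀ p ∈ xs, p.1 ≠ x) :
    xs.find? (fun q => q.1 == x) = none := by
  rw [List.find?_eq_none]
  intro p hp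
  simp [beq_iff_eq, h p hp]

lemma pv_update_items_nodup (d : PySem.Dict String Int) (ps : List (String × Int))
    (hnd : (ps.map (·.1)).Nodup) :
    (d.update ps).items = d.items.map (pvOw ps) ++ ps.filter (fun p => !(d.contains p.1)) := by
  induction ps generalizing d with
  | nil =>
    have h0 : ∀ q : String × Int, pvOw [] q = q := fun q => rfl
    simp only [PySem.Dict.update, List.foldl_nil, List.filter_nil, List.append_nil]
    exact (List.map_congr_left (fun q _ => h0 q)).symm.trans (List.map_id _) |>.symm
  | cons p ps ih =>
    simp only [List.map_cons, List.nodup_cons] at hnd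
    have hstep : (d.update (p :: ps)) = ((d.insert p.1 p.2).update ps) := rfl
    rw [hstep, ih _ hnd.2]
    by_cases hc : d.contains p.1
    · rw [PySem.Dict.items_insert_of_contains d p.2 hc]
      rw [List.map_map]
      have hmap : ∀ q ∈ d.items,
          (pvOw ps ∘ fun q => if (q.1 == p.1) = true then (p.1, p.2) else q) q = pvOw (p :: ps) q := by
        intro q _
        by_cases hq : q.1 = p.1
        · have hfind : ps.find? (fun r => r.1 == p.1) = none :=
            pv_find?_key_eq_none ps p.1 (fun r hr he => hnd.1 (he ▸ List.mem_map.mpr ⟨r, hr, rfl⟩))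
          simp [pvOw, hq, List.find?_cons, beq_iff_eq, hfind]
        · simp [pvOw, hq, List.find?_cons, beq_iff_eq, Ne.symm hq]
      rw [List.map_congr_left hmap]
      congr 1
      have hfilter : ps.filter (fun q => !((d.insert p.1 p.2).contains q.1))
          = ps.filter (fun q => !(d.contains q.1)) := by
        apply List.filter_congr
        intro q hq
        have : q.1 ≠ p.1 := fun he => hnd.1 (he ▸ List.mem_map.mpr ⟨q, hq, rfl⟩)
        rw [PySem.Dict.contains_insert]
        simp [beq_iff_eq, this]
      rw [hfilter, List.filter_cons]
      simp [hc]
    · rw [PySem.Dict.items_insert_of_not_contains d p.2 (by simpa using hc)]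
      rw [List.map_append]
      have hkeys : ∀ q ∈ d.items, q.1 ≠ p.1 := by
        intro q hq he
        exact hc (List.any_eq_true.mpr ⟨q, hq, by simp [he]⟩)
      have hmap : ∀ q ∈ d.items, pvOw ps q = pvOw (p :: ps) q := by
        intro q hq
        simp [pvOw, List.find?_cons, beq_iff_eq, Ne.symm (hkeys q hq)]
      rw [List.map_congr_left hmap]
      have hfind : ps.find? (fun r => r.1 == p.1) = none :=
        pv_find?_key_eq_none ps p.1 (fun r hr he => hnd.1 (he ▸ List.mem_map.mpr ⟨r, hr, rfl⟩))
      have hp_ow : pvOw ps (p.1, p.2) = (p.1, p.2) := by simp [pvOw, hfind]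
      have hfilter : ps.filter (fun q => !((d.insert p.1 p.2).contains q.1))
          = ps.filter (fun q => !(d.contains q.1)) := by
        apply List.filter_congr
        intro q hq
        have : q.1 ≠ p.1 := fun he => hnd.1 (he ▸ List.mem_map.mpr ⟨q, hq, rfl⟩)
        rw [PySem.Dict.contains_insert]
        simp [beq_iff_eq, this]
      rw [hfilter, List.filter_cons]
      simp [hc, hp_ow]

lemma pv_pvOw_filter_eq_pvOv (d2 : PySem.Dict String Int) (L : List String)
    (q : String × Int) (hq : q.1 ∉ L) :
    pvOw (d2.items.filter (fun p => !(decide (p.1 ∈ L)))) q = pvOv d2 q := by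
  unfold pvOw pvOv
  rw [pv_find?_filter_key d2.items q.1 (fun y => !(decide (y ∈ L))) (by simp [hq])]
  by_cases hc : d2.contains q.1
  · cases hr : d2.items.find? (fun p => p.1 == q.1) with
    | none =>
      exfalso
      rcases List.any_eq_true.mp hc with ⟨p, hp, hpq⟩
      exact absurd hpq (by simpa using List.find?_eq_none.mp hr p hp)
    | some r =>
      simp [hr, hc, PySem.Dict.getD, PySem.Dict.get?]
  · have : d2.items.find? (fun p => p.1 == q.1) = none := by
      rw [List.find?_eq_none]
      intro p hp
      simp only [PySem.Dict.contains] at hc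
      intro hb
      exact hc (List.any_eq_true.mpr ⟨p, hp, hb⟩)
    simp [this, hc]

lemma pv_foldB (ks : List String) : ∀ (a b : PySem.Dict String Int), ks.Nodup →
    ((ks.foldl
      (fun (st : PySem.Dict String Int × PySem.Dict String Int) k =>
        if st.1.contains k then (st.1.erase k, st.2.erase k)
        else (st.1.insert k (st.2.getD k 0), st.2))
      (a, b)).1).items
    = a.items.filter (fun p => !(decide (p.1 ∈ ks)))
      ++ (ks.filter (fun k => !(a.contains k))).map (fun k => (k, b.getD k 0)) := by
  induction ks with
  | nil => intro a b _; simp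
  | cons k ks ih =>
    intro a b hnd
    simp only [List.nodup_cons] at hnd
    rw [List.foldl_cons]
    by_cases hc : a.contains k
    · rw [if_pos hc]
      rw [ih (a.erase k) (b.erase k) hnd.2]
      congr 1
      · rw [show (a.erase k).items = a.items.filter (fun p => !(p.1 == k)) from rfl,
            List.filter_filter]
        apply List.filter_congr
        intro p _
        by_cases hpk : p.1 = k <;> by_cases hpm : p.1 ∈ ks <;>
          simp [hpk, hpm, beq_iff_eq]
      · have hflt : ks.filter (fun k' => !((a.erase k).contains k'))
            = ks.filter (fun k' => !(a.contains k')) := by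
          apply List.filter_congr
          intro k' hk'
          have : k' ≠ k := fun he => hnd.1 (he ▸ hk')
          rw [pv_contains_erase]
          simp [this]
        rw [hflt]
        have hkdrop : (k :: ks).filter (fun k' => !(a.contains k'))
            = ks.filter (fun k' => !(a.contains k')) := by
          simp [List.filter_cons, hc]
        rw [hkdrop]
        apply List.map_congr_left
        intro k' hk'
        have : k' ≠ k := fun he => hnd.1 (he ▸ (List.mem_filter.mp hk').1)
        rw [pv_getD_erase_of_ne _ _ _ _ this]
    · rw [if_neg hc]
      rw [ih _ b hnd.2]
      rw [PySem.Dict.items_insert_of_not_contains a (b.getD k 0) (by simpa using hc)]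
      have hknotin : ∀ p ∈ a.items, p.1 ≠ k := by
        intro p hp he
        exact hc (List.any_eq_true.mpr ⟨p, hp, by simp [he]⟩)
      rw [List.filter_append]
      have h1 : a.items.filter (fun p => !(decide (p.1 ∈ ks)))
          = a.items.filter (fun p => !(decide (p.1 ∈ k :: ks))) := by
        apply List.filter_congr
        intro p hp
        simp [List.mem_cons, hknotin p hp]
      have h2 : ([(k, b.getD k 0)] : List (String × Int)).filter (fun p => !(decide (p.1 ∈ ks)))
          = [(k, b.getD k 0)] := by
        simp [hnd.1]
      have h3 : ks.filter (fun k' => !((a.insert k (b.getD k 0)).contains k'))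
          = ks.filter (fun k' => !(a.contains k')) := by
        apply List.filter_congr
        intro k' hk'
        have : k' ≠ k := fun he => hnd.1 (he ▸ hk')
        rw [PySem.Dict.contains_insert]
        simp [this]
      rw [h1, h2, h3]
      have h4 : (k :: ks).filter (fun k' => !(a.contains k'))
          = k :: ks.filter (fun k' => !(a.contains k')) := by
        simp [List.filter_cons, hc]
      rw [h4, List.map_cons, List.append_assoc]
      rfl

lemma pvOv_fst (d2 : PySem.Dict String Int) (q : String × Int) : (pvOv d2 q).1 = q.1 := by
  unfold pvOv; split <;> rfl

lemma pvOv_idem (d2 : PySem.Dict String Int) (q : String × Int) :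
    pvOv d2 (pvOv d2 q) = pvOv d2 q := by
  unfold pvOv
  by_cases hc : d2.contains q.1 <;> simp [hc]

lemma pv_nodup_keys_pvBi (d2 : PySem.Dict String Int) (hn2 : d2.keys.Nodup) (l : List String) :
    ((pvBi d2 l).map (·.1)).Nodup := by
  have hsub : (pvBi d2 l).Sublist d2.items := List.filter_sublist
  have hn2' : (d2.items.map (fun x => x.1)).Nodup := hn2
  exact (hsub.map (fun x => x.1)).nodup hn2'

lemma pv_mem_d2only (d1 d2 : PySem.Dict String Int) (q : String × Int)
    (hq : q ∈ d2.items.filter (fun p => !(d1.contains p.1))) :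
    q ∈ d2.items ∧ d1.contains q.1 = false := by
  rcases List.mem_filter.mp hq with ⟨h1, h2⟩
  exact ⟨h1, by simpa using h2⟩

lemma pv_getD_eq_of_mem (d2 : PySem.Dict String Int) (hn2 : d2.keys.Nodup)
    (q : String × Int) (hq : q ∈ d2.items) : d2.getD q.1 0 = q.2 := by
  have : (q.1, q.2) ∈ d2.items := by simpa using hq
  exact PySem.Dict.getD_of_mem_items d2 this hn2 0

lemma pv_contains_of_mem (d : PySem.Dict String Int) (q : String × Int) (hq : q ∈ d.items) :
    d.contains q.1 = true :=
  List.any_eq_true.mpr ⟨q, hq, by simp⟩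

lemma pv_update_core (d1 d2 : PySem.Dict String Int) (hn2 : d2.keys.Nodup) (l' : List String)
    (hl' : ∀ k' ∈ l', d1.contains k' = true)
    (F : (String × Int) → (String × Int)) (hFkey : ∀ q, (F q).1 = q.1)
    (hF : ∀ q ∈ d1.items, q.1 ∉ l' → pvOw (pvBi d2 l') (F q) = pvOv d2 q) :
    (PySem.Dict.mk ((d1.items.filter (fun p => !(decide (p.1 ∈ l')))).map F
        ++ d2.items.filter (fun p => !(d1.contains p.1)))).update (pvBi d2 l')
    = PySem.Dict.mk (pvAi d1 d2 l') := by
  apply PySem.Dict.ext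
  rw [pv_update_items_nodup _ _ (pv_nodup_keys_pvBi d2 hn2 l')]
  have happ : (pvBi d2 l').filter
      (fun p => !((PySem.Dict.mk ((d1.items.filter (fun p => !(decide (p.1 ∈ l')))).map F
        ++ d2.items.filter (fun p => !(d1.contains p.1)))).contains p.1)) = [] := by
    rw [List.filter_eq_nil_iff]
    intro p hp
    rcases List.mem_filter.mp hp with ⟨hpd2, hpl⟩
    have hpl' : p.1 ∉ l' := by simpa using hpl
    suffices h : (PySem.Dict.mk ((d1.items.filter (fun p => !(decide (p.1 ∈ l')))).map F
        ++ d2.items.filter (fun p => !(d1.contains p.1)))).contains p.1 = true by simp [h]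
    by_cases hc : d1.contains p.1
    · rcases List.any_eq_true.mp hc with ⟨q0, hq0, hq0b⟩
      have hq0k : q0.1 = p.1 := by simpa using hq0b
      have hmem : F q0 ∈ ((d1.items.filter (fun p => !(decide (p.1 ∈ l')))).map F
          ++ d2.items.filter (fun p => !(d1.contains p.1))) :=
        List.mem_append_left _
          (List.mem_map.mpr ⟨q0, List.mem_filter.mpr ⟨hq0, by simp [hq0k, hpl']⟩, rfl⟩)
      have hcm := pv_contains_of_mem (PySem.Dict.mk
          ((d1.items.filter (fun p => !(decide (p.1 ∈ l')))).map F
            ++ d2.items.filter (fun p => !(d1.contains p.1)))) (F q0) hmem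
      rwa [hFkey, hq0k] at hcm
    · have hmem : p ∈ d2.items.filter (fun p => !(d1.contains p.1)) :=
        List.mem_filter.mpr ⟨hpd2, by simpa using hc⟩
      exact pv_contains_of_mem _ p (List.mem_append_right _ hmem)
  rw [happ, List.append_nil]
  show ((d1.items.filter (fun p => !(decide (p.1 ∈ l')))).map F
      ++ d2.items.filter (fun p => !(d1.contains p.1))).map (pvOw (pvBi d2 l')) = pvAi d1 d2 l'
  rw [List.map_append, List.map_map]
  unfold pvAi
  congr 1
  · apply List.map_congr_left
    intro q hq
    rcases List.mem_filter.mp hq with ⟨hqd1, hql⟩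
    exact hF q hqd1 (by simpa using hql)
  · apply (List.map_congr_left ?_).trans (List.map_id _)
    intro q hq
    rcases pv_mem_d2only d1 d2 q hq with ⟨hqd2, hqc⟩
    have hql' : q.1 ∉ l' := fun hmem => by rw [hl' q.1 hmem] at hqc; cases hqc
    have hrw := pv_pvOw_filter_eq_pvOv d2 l' q hql'
    show pvOw (d2.items.filter (fun p => !(decide (p.1 ∈ l')))) q = id q
    rw [hrw]
    unfold pvOv
    rw [if_pos (pv_contains_of_mem d2 q hqd2), pv_getD_eq_of_mem d2 hn2 q hqd2]
    rfl

lemma pv_filter_keyne_eq_singleton (xs : List (String × Int)) (k : String) :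
    xs.filter (fun p => !(p.1 == k)) = xs.filter (fun p => !(decide (p.1 ∈ [k]))) := by
  apply List.filter_congr
  intro p _
  by_cases h : p.1 = k <;> simp [h]

lemma pv_step0 (d1 d2 : PySem.Dict String Int) (hn2 : d2.keys.Nodup) (k0 : String)
    (hk1 : d1.contains k0 = true) :
    (d1.erase k0).update ((d2.erase k0)).items = PySem.Dict.mk (pvAi d1 d2 [k0])
    ∧ d2.erase k0 = PySem.Dict.mk (pvBi d2 [k0]) := by
  have hb : d2.erase k0 = PySem.Dict.mk (pvBi d2 [k0]) := by
    apply PySem.Dict.ext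
    exact pv_filter_keyne_eq_singleton d2.items k0
  refine ⟨?_, hb⟩
  rw [hb]
  show (d1.erase k0).update (pvBi d2 [k0]) = _
  apply PySem.Dict.ext
  rw [pv_update_items_nodup _ _ (pv_nodup_keys_pvBi d2 hn2 [k0])]
  have ha : (d1.erase k0).items = d1.items.filter (fun p => !(decide (p.1 ∈ [k0]))) :=
    pv_filter_keyne_eq_singleton d1.items k0
  rw [ha]
  unfold pvAi
  congr 1
  · apply List.map_congr_left
    intro q hq
    have hq1 : q.1 ∉ [k0] := by simpa using (List.mem_filter.mp hq).2
    exact pv_pvOw_filter_eq_pvOv d2 [k0] q hq1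
  · unfold pvBi
    rw [List.filter_filter]
    have : ∀ p ∈ d2.items,
        ((!(d1.erase k0).contains p.1) && !(decide (p.1 ∈ [k0]))) = ((!(d1.contains p.1)) && !(decide (p.1 ∈ [k0]))) := by
      intro p _
      rw [pv_contains_erase]
      by_cases h : p.1 = k0 <;> simp [h]
    rw [List.filter_congr this]
    apply List.filter_congr
    intro p _
    cases hc : d1.contains p.1 with
    | true => simp
    | false =>
      have hne : p.1 ≠ k0 := fun he => by rw [he, hk1] at hc; cases hc
      simp [hne]

lemma pv_stepA (d1 d2 : PySem.Dict String Int) (hn2 : d2.keys.Nodup)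
    (l : List String) (k : String)
    (hl : ∀ k' ∈ l, d1.contains k' = true) (hk1 : d1.contains k = true) :
    ((PySem.Dict.mk (pvAi d1 d2 l)).erase k).update
        (((PySem.Dict.mk (pvBi d2 l)).erase k)).items
      = PySem.Dict.mk (pvAi d1 d2 (l ++ [k]))
    ∧ (PySem.Dict.mk (pvBi d2 l)).erase k = PySem.Dict.mk (pvBi d2 (l ++ [k])) := by
  have hfltcomb : ∀ (xs : List (String × Int)),
      (xs.filter (fun p => !(decide (p.1 ∈ l)))).filter (fun p => !(p.1 == k))
      = xs.filter (fun p => !(decide (p.1 ∈ l ++ [k]))) := by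
    intro xs
    rw [List.filter_filter]
    apply List.filter_congr
    intro p _
    by_cases h1 : p.1 ∈ l <;> by_cases h2 : p.1 = k <;> simp [h1, h2]
  have hb : (PySem.Dict.mk (pvBi d2 l)).erase k = PySem.Dict.mk (pvBi d2 (l ++ [k])) := by
    apply PySem.Dict.ext
    show (pvBi d2 l).filter (fun p => !(p.1 == k)) = pvBi d2 (l ++ [k])
    exact hfltcomb d2.items
  refine ⟨?_, hb⟩
  rw [hb]
  have ha : (PySem.Dict.mk (pvAi d1 d2 l)).erase k
      = PySem.Dict.mk ((d1.items.filter (fun p => !(decide (p.1 ∈ l ++ [k])))).map (pvOv d2)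
          ++ d2.items.filter (fun p => !(d1.contains p.1))) := by
    apply PySem.Dict.ext
    show (pvAi d1 d2 l).filter (fun p => !(p.1 == k)) = _
    unfold pvAi
    rw [List.filter_append]
    congr 1
    · rw [List.filter_map]
      have : ((fun p => !(p.1 == k)) ∘ pvOv d2) = fun q => !(q.1 == k) := by
        funext q
        simp [Function.comp, pvOv_fst]
      rw [this, hfltcomb d1.items]
    · apply List.filter_eq_self.mpr
      intro p hp
      have hpc : d1.contains p.1 = false := by simpa using (List.mem_filter.mp hp).2
      have : p.1 ≠ k := fun he => by rw [he, hk1] at hpc; cases hpc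
      simp [this]
  rw [ha]
  show (PySem.Dict.mk _).update (pvBi d2 (l ++ [k])) = _
  apply pv_update_core d1 d2 hn2 (l ++ [k])
  · intro k' hk'
    rcases List.mem_append.mp hk' with h | h
    · exact hl k' h
    · rw [List.mem_singleton.mp h]; exact hk1
  · exact pvOv_fst d2
  · intro q _ hql
    have hkey : (pvOv d2 q).1 ∉ l ++ [k] := by rw [pvOv_fst]; exact hql
    have := pv_pvOw_filter_eq_pvOv d2 (l ++ [k]) (pvOv d2 q) hkey
    calc pvOw (pvBi d2 (l ++ [k])) (pvOv d2 q)
        = pvOv d2 (pvOv d2 q) := this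
      _ = pvOv d2 q := pvOv_idem d2 q

lemma pv_foldA (d1 d2 : PySem.Dict String Int) (hn2 : d2.keys.Nodup)
    (r : List String) : ∀ (l : List String),
    (∀ k' ∈ l, d1.contains k' = true) →
    (∀ k' ∈ r, d1.contains k' = true) →
    (r.foldl
      (fun (st : PySem.Dict String Int × PySem.Dict String Int) k =>
        ((st.1.erase k).update (st.2.erase k).items, st.2.erase k))
      (PySem.Dict.mk (pvAi d1 d2 l), PySem.Dict.mk (pvBi d2 l))).1.items
    = pvAi d1 d2 (l ++ r) := by
  induction r with
  | nil => intro l _ _; simp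
  | cons k r ih =>
    intro l hl hr
    rw [List.foldl_cons]
    rcases pv_stepA d1 d2 hn2 l k hl (hr k (List.mem_cons_self)) with ⟨hA, hB⟩
    rw [show ((((PySem.Dict.mk (pvAi d1 d2 l)).erase k).update
          (((PySem.Dict.mk (pvBi d2 l)).erase k)).items, (PySem.Dict.mk (pvBi d2 l)).erase k)
        : PySem.Dict String Int × PySem.Dict String Int)
        = (PySem.Dict.mk (pvAi d1 d2 (l ++ [k])), PySem.Dict.mk (pvBi d2 (l ++ [k])))
      from by rw [hA, hB]]
    rw [ih (l ++ [k])
      (fun k' hk' => by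
        rcases List.mem_append.mp hk' with h | h
        · exact hl k' h
        · rw [List.mem_singleton.mp h]; exact hr k (List.mem_cons_self))
      (fun k' hk' => hr k' (List.mem_cons_of_mem _ hk'))]
    simp [List.append_assoc]

lemma pv_set3_spec (d1 d2 : PySem.Dict String Int) (hn1 : d1.keys.Nodup) :
    PySem.Set.inter (PySem.Set.ofList d1.keys) (PySem.Set.ofList d2.keys)
    = d1.keys.filter (fun k => d2.contains k) := by
  rw [PySem.Set.ofList_eq_self_of_nodup d1.keys hn1]
  show d1.keys.filter (fun k => (PySem.Set.ofList d2.keys).contains k) = _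
  apply List.filter_congr
  intro k _
  rw [PySem.Set.contains_eq_listContains]
  cases hc : d2.contains k with
  | true =>
    have hk : k ∈ d2.keys := (PySem.Dict.contains_iff_mem_keys d2 k).mp hc
    simp [PySem.Set.mem_ofList, hk]
  | false =>
    have hk : k ∉ PySem.Set.ofList d2.keys := by
      rw [PySem.Set.mem_ofList]
      exact fun hm => by rw [(PySem.Dict.contains_iff_mem_keys d2 k).mpr hm] at hc; cases hc
    simpa using hk

lemma pv_mem_set3 (d1 d2 : PySem.Dict String Int) (k : String) :
    k ∈ d1.keys.filter (fun k => d2.contains k) ↔ d1.contains k = true ∧ d2.contains k = true := by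
  rw [List.mem_filter]
  constructor
  · rintro ⟨h1, h2⟩
    exact ⟨(PySem.Dict.contains_iff_mem_keys d1 k).mpr h1, h2⟩
  · rintro ⟨h1, h2⟩
    exact ⟨(PySem.Dict.contains_iff_mem_keys d1 k).mp h1, h2⟩

lemma pv_A_eq_merge (d1 d2 : PySem.Dict String Int)
    (hn1 : d1.keys.Nodup) (hn2 : d2.keys.Nodup) (dict1 dict2 : List (String × Int))
    (h1 : PySem.Dict.ofList dict1 = d1) (h2 : PySem.Dict.ofList dict2 = d2) :
    combine_pos_neg_lexica dict1 dict2 = pvMerge d1 d2 := by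
  unfold combine_pos_neg_lexica
  simp only [h1, h2]
  rw [pv_set3_spec d1 d2 hn1]
  cases hset : d1.keys.filter (fun k => d2.contains k) with
  | nil =>
    have hlen : (PySem.Set.len ([] : List String) == (0 : Int)) = true := by decide
    rw [hlen, if_pos rfl]
    rw [pv_update_items_nodup d1 d2.items hn2]
    have hdisj : ∀ q ∈ d1.items, d2.contains q.1 = false := by
      intro q hq
      cases hc : d2.contains q.1 with
      | true =>
        exfalso
        have hk : q.1 ∈ d1.keys.filter (fun k => d2.contains k) :=
          (pv_mem_set3 d1 d2 q.1).mpr ⟨pv_contains_of_mem d1 q hq, hc⟩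
        rw [hset] at hk
        cases hk
      | false => rfl
    unfold pvMerge
    congr 1
    · have hmap : ∀ q ∈ d1.items, pvOw d2.items q = q := by
        intro q hq
        have hfind : d2.items.find? (fun p => p.1 == q.1) = none := by
          apply pv_find?_key_eq_none
          intro p hp he
          have := pv_contains_of_mem d2 p hp
          rw [he, hdisj q hq] at this
          cases this
        simp [pvOw, hfind]
      rw [List.map_congr_left hmap]
      simp only [List.map_id_fun', id_eq]
      symm
      apply List.filter_eq_self.mpr
      intro q hq
      simp [hdisj q hq]
  | cons k0 r =>
    have hlen : (PySem.Set.len (k0 :: r) == (0 : Int)) = false := by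
      simp [PySem.Set.len]
      omega
    rw [hlen, if_neg (by simp)]

    rw [List.foldl_cons]
    rcases pv_step0 d1 d2 hn2 k0
      (((pv_mem_set3 d1 d2 k0).mp (hset ▸ List.mem_cons_self)).1) with ⟨hA, hB⟩
    rw [show (((d1.erase k0).update ((d2.erase k0)).items, d2.erase k0)
        : PySem.Dict String Int × PySem.Dict String Int)
        = (PySem.Dict.mk (pvAi d1 d2 [k0]), PySem.Dict.mk (pvBi d2 [k0]))
      from by rw [hA, hB]]
    rw [pv_foldA d1 d2 hn2 r [k0]
      (fun k' hk' => by
        rw [List.mem_singleton.mp hk']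
        exact ((pv_mem_set3 d1 d2 k0).mp (hset ▸ List.mem_cons_self)).1)
      (fun k' hk' => ((pv_mem_set3 d1 d2 k').mp (hset ▸ List.mem_cons_of_mem _ hk')).1)]
    have hlk : ([k0] ++ r) = d1.keys.filter (fun k => d2.contains k) := by rw [hset]; rfl
    rw [hlk]
    unfold pvAi pvMerge
    congr 1
    have hflt : d1.items.filter
        (fun p => !(decide (p.1 ∈ d1.keys.filter (fun k => d2.contains k))))
        = d1.items.filter (fun p => !(d2.contains p.1)) := by
      apply List.filter_congr
      intro q hq
      cases hc : d2.contains q.1 with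
      | true =>
        have : q.1 ∈ d1.keys.filter (fun k => d2.contains k) :=
          (pv_mem_set3 d1 d2 q.1).mpr ⟨pv_contains_of_mem d1 q hq, hc⟩
        simp [this]
      | false =>
        have : q.1 ∉ d1.keys.filter (fun k => d2.contains k) := fun hm => by
          rw [((pv_mem_set3 d1 d2 q.1).mp hm).2] at hc; cases hc
        simp [this]
    rw [hflt]
    apply (List.map_congr_left ?_).trans (List.map_id _)
    intro q hq
    have hqc : d2.contains q.1 = false := by simpa using (List.mem_filter.mp hq).2
    simp [pvOv, hqc]

lemma pv_B_eq_merge (d1 d2 : PySem.Dict String Int)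
    (hn1 : d1.keys.Nodup) (hn2 : d2.keys.Nodup) (dict1 dict2 : List (String × Int))
    (h1 : PySem.Dict.ofList dict1 = d1) (h2 : PySem.Dict.ofList dict2 = d2) :
    combine_pos_neg_lexica_alt dict1 dict2 = pvMerge d1 d2 := by
  unfold combine_pos_neg_lexica_alt
  simp only [h1, h2]
  rw [pv_foldB d2.keys d1 d2 hn2]
  unfold pvMerge
  congr 1
  · apply List.filter_congr
    intro q _
    cases hc : d2.contains q.1 with
    | true => simp [(PySem.Dict.contains_iff_mem_keys d2 q.1).mp hc]
    | false =>
      have : q.1 ∉ d2.keys := fun hm => by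
        rw [(PySem.Dict.contains_iff_mem_keys d2 q.1).mpr hm] at hc; cases hc
      simp [this]
  · rw [PySem.Dict.items_eq_map_keys d2 hn2 0, List.filter_map]
    rw [List.map_congr_left (fun k _ => rfl :
      ∀ k ∈ (d2.keys.filter ((fun p => !(d1.contains p.1)) ∘ (fun k => (k, d2.getD k 0)))),
        (fun k => (k, d2.getD k 0)) k = (fun k => (k, d2.getD k 0)) k)]
    congr 1

-- ===== VERDICT (by name: the statement is the Claim_ definition above) =====
theorem combine_pos_neg_lexica_spec : Claim_equal_combine_pos_neg_lexica := by
  intro dict1 dict2 _hdom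
  unfold Spec_combine_pos_neg_lexica
  rw [pv_A_eq_merge (PySem.Dict.ofList dict1) (PySem.Dict.ofList dict2)
        (PySem.Dict.nodup_keys_ofList dict1) (PySem.Dict.nodup_keys_ofList dict2) dict1 dict2 rfl rfl,
      pv_B_eq_merge (PySem.Dict.ofList dict1) (PySem.Dict.ofList dict2)
        (PySem.Dict.nodup_keys_ofList dict1) (PySem.Dict.nodup_keys_ofList dict2) dict1 dict2 rfl rfl]
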